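-- pv_equiv track=rewrite | github.com/nickdeng1/Auto-Company | scripts/memory/memory_retriever.py | _truncate_memories
-- ===== SOURCE A (Python) =====
-- from typing import Optional, Dict, List, Any
--
-- def _truncate_memories(memories: List[str], max_length: int) -> List[str]:
--     """Truncate memory list to fit within length limit"""
--     result = []
--     total_length = 0
--
--     for mem in memories:
--         if total_length + len(mem) <= max_length:
--             result.append(mem)
--             total_length += len(mem)
--         else:
--             break
--
--     return result
-- ===== SOURCE B (Python) =====
-- from typing import List
--
-- def _truncate_memories(memories: List[str], max_length: int) -> List[str]:
--     """Prefix-sum table + binary search for the cutoff (instead of scan-with-break)."""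
--     cumsum = []
--     total = 0
--     for m in memories:
--         total += len(m)
--         cumsum.append(total)
--     # bisect_right(cumsum, max_length): cumsum is non-decreasing, so the answer
--     # is the number of leading prefix sums <= max_length.
--     lo, hi = 0, len(cumsum)
--     while lo < hi:
--         mid = (lo + hi) // 2
--         if max_length < cumsum[mid]:
--             hi = mid
--         else:
--             lo = mid + 1
--     return memories[:lo]
-- ===== Notes on version B (the rewrite author's own statement) =====
-- stated objective: alternative
-- what changed: Replaces the incremental accumulate-and-break loop by building the prefix-sum table first and binary-searching it for the number of leading memories whose cumulative length fits the budget.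
import Mathlib
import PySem

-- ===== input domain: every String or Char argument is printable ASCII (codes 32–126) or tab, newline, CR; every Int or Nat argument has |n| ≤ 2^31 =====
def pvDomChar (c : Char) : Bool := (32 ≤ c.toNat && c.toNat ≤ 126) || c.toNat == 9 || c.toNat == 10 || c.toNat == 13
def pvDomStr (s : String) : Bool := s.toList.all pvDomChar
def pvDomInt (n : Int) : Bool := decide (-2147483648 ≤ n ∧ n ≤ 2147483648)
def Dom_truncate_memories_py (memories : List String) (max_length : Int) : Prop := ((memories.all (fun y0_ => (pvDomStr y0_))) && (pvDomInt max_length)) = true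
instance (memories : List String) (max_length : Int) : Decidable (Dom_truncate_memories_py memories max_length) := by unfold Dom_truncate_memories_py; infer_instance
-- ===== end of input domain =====

-- B replaces A's accumulate-and-break scan by a prefix-sum table plus a binary search
-- for the cutoff (alternative decomposition; same results, proved equal on Dom).


-- ===== PORT A =====
-- the for-loop with break, as structural recursion over the list with the running total
def pvTruncAux (max_length : Int) : List String → Int → List String
  | [], _ => []
  | m :: ms, total =>
    if total + PySem.Str.len m ≤ max_length then
      m :: pvTruncAux max_length ms (total + PySem.Str.len m)
    else []

def truncate_memories_py (memories : List String) (max_length : Int) : List String :=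
  pvTruncAux max_length memories 0

-- ===== PORT B =====
-- first loop of Source B: build the prefix-sum table (state = (cumsum, total))
def pvCumsum (memories : List String) : List Int :=
  (memories.foldl (fun (st : List Int × Int) m =>
    let total := st.2 + PySem.Str.len m
    (st.1 ++ [total], total)) ([], 0)).1

-- the hand-rolled bisect_right while-loop of Source B (lo, hi are nonnegative throughout)
def pvBisect (cum : List Int) (x : Int) (lo hi : Nat) : Nat :=
  if _h : lo < hi then
    let mid := (lo + hi) / 2
    if x < cum.getD mid 0 then pvBisect cum x lo mid
    else pvBisect cum x (mid + 1) hi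
  else lo
termination_by hi - lo
decreasing_by
  · omega
  · omega

def truncate_memories_py_alt (memories : List String) (max_length : Int) : List String :=
  memories.take (pvBisect (pvCumsum memories) max_length 0 (pvCumsum memories).length)

-- ===== PRECONDITION & SPEC =====
def Spec_truncate_memories_py (memories : List String) (max_length : Int) (out : List String) : Prop := out = truncate_memories_py_alt memories max_length
instance (memories : List String) (max_length : Int) (out : List String) : Decidable (Spec_truncate_memories_py memories max_length out) := by unfold Spec_truncate_memories_py; infer_instance

-- ===== CLAIM (what is proved, stated in full; the proofs are below) =====
def Claim_equal_truncate_memories_py : Prop := ∀ (memories : List String) (max_length : Int), Dom_truncate_memories_py memories max_length → Spec_truncate_memories_py memories max_length (truncate_memories_py memories max_length)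

-- ===== LEMMAS AND PROOFS =====

-- prefix sums starting from total t (specification-side description of pvCumsum)
def pvPsums (t : Int) : List String → List Int
  | [] => []
  | m :: ms => (t + PySem.Str.len m) :: pvPsums (t + PySem.Str.len m) ms

-- the number of leading memories A keeps when the running total starts at t
def pvCount (max_length : Int) : List String → Int → Nat
  | [], _ => 0
  | m :: ms, t =>
    if t + PySem.Str.len m ≤ max_length then pvCount max_length ms (t + PySem.Str.len m) + 1
    else 0

theorem pvTruncAux_eq_take (max_length : Int) (ms : List String) (t : Int) :
    pvTruncAux max_length ms t = ms.take (pvCount max_length ms t) := by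
  induction ms generalizing t with
  | nil => rfl
  | cons m ms ih =>
    simp only [pvTruncAux, pvCount]
    split_ifs with h
    · simp [ih]
    · rfl

theorem pvCumsum_loop (ms : List String) (acc : List Int) (t : Int) :
    (ms.foldl (fun (st : List Int × Int) m =>
      (st.1 ++ [st.2 + PySem.Str.len m], st.2 + PySem.Str.len m)) (acc, t)).1
    = acc ++ pvPsums t ms := by
  induction ms generalizing acc t with
  | nil => simp [pvPsums]
  | cons m ms ih =>
    simp only [List.foldl_cons, pvPsums]
    rw [ih]
    simp

theorem pvCumsum_eq (ms : List String) : pvCumsum ms = pvPsums 0 ms := by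
  simpa using pvCumsum_loop ms [] 0

theorem pvStrLen_nonneg (m : String) : 0 ≤ PySem.Str.len m := by
  simp [PySem.Str.len_eq]

theorem pvPsums_ge (t : Int) (ms : List String) : ∀ x ∈ pvPsums t ms, t ≤ x := by
  induction ms generalizing t with
  | nil => simp [pvPsums]
  | cons m ms ih =>
    intro x hx
    have hl := pvStrLen_nonneg m
    simp only [pvPsums, List.mem_cons] at hx
    rcases hx with rfl | hx
    · omega
    · have := ih (t + PySem.Str.len m) x hx; omega

-- the key characterisation: pvCount is the cut point of the prefix-sum list
theorem pvCount_props (max_length t : Int) (ms : List String) :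
    pvCount max_length ms t ≤ (pvPsums t ms).length ∧
    (∀ i (h : i < (pvPsums t ms).length), i < pvCount max_length ms t → (pvPsums t ms)[i] ≤ max_length) ∧
    (∀ i (h : i < (pvPsums t ms).length), pvCount max_length ms t ≤ i → max_length < (pvPsums t ms)[i]) := by
  induction ms generalizing t with
  | nil => exact ⟨Nat.zero_le _, by simp [pvPsums], by simp [pvPsums]⟩
  | cons m ms ih =>
    obtain ⟨ih1, ih2, ih3⟩ := ih (t + PySem.Str.len m)
    simp only [pvPsums, pvCount, List.length_cons]
    split_ifs with h
    · refine ⟨by omega, ?_, ?_⟩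
      · intro i hi hlt
        match i with
        | 0 => simpa using h
        | i + 1 => exact ih2 i (by simpa using hi) (by omega)
      · intro i hi hge
        match i with
        | i + 1 => exact ih3 i (by simpa using hi) (by omega)
    · refine ⟨Nat.zero_le _, by omega, ?_⟩
      intro i hi _
      match i with
      | 0 => simpa using h
      | i + 1 =>
        have hmem : (pvPsums (t + PySem.Str.len m) ms)[i] ∈ pvPsums (t + PySem.Str.len m) ms :=
          List.getElem_mem _
        have := pvPsums_ge (t + PySem.Str.len m) ms _ hmem
        simp only [List.getElem_cons_succ]
        omega

-- the binary search finds the unique cut point k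
theorem pvBisect_eq (cum : List Int) (x : Int) (k : Nat)
    (hle : ∀ i (h : i < cum.length), i < k → cum[i] ≤ x)
    (hgt : ∀ i (h : i < cum.length), k ≤ i → x < cum[i]) :
    ∀ n lo hi, hi - lo ≤ n → lo ≤ k → k ≤ hi → hi ≤ cum.length → pvBisect cum x lo hi = k := by
  intro n
  induction n with
  | zero =>
    intro lo hi hn h1 h2 h3
    rw [pvBisect]
    simp only [dif_neg (by omega : ¬ lo < hi)]
    omega
  | succ n ih =>
    intro lo hi hn h1 h2 h3
    rw [pvBisect]
    by_cases hlh : lo < hi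
    · simp only [dif_pos hlh]
      have hmid : (lo + hi) / 2 < cum.length := by omega
      have hgetD : cum.getD ((lo + hi) / 2) 0 = cum[(lo + hi) / 2] := List.getD_eq_getElem _ _ hmid
      by_cases hx : x < cum.getD ((lo + hi) / 2) 0
      · simp only [if_pos hx]
        have hk : k ≤ (lo + hi) / 2 := by
          by_contra hc
          have := hle ((lo + hi) / 2) hmid (by omega)
          rw [hgetD] at hx; omega
        exact ih lo ((lo + hi) / 2) (by omega) h1 hk (by omega)
      · simp only [if_neg hx]
        have hk : (lo + hi) / 2 < k := by
          by_contra hc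
          have := hgt ((lo + hi) / 2) hmid (by omega)
          rw [hgetD] at hx; omega
        exact ih ((lo + hi) / 2 + 1) hi (by omega) (by omega) h2 h3
    · simp only [dif_neg hlh]; omega

-- ===== VERDICT (by name: the statement is the Claim_ definition above) =====
theorem truncate_memories_py_spec : Claim_equal_truncate_memories_py := by
  intro memories max_length _
  unfold Spec_truncate_memories_py truncate_memories_py truncate_memories_py_alt
  rw [pvTruncAux_eq_take, pvCumsum_eq]
  obtain ⟨h1, h2, h3⟩ := pvCount_props max_length 0 memories
  rw [pvBisect_eq (pvPsums 0 memories) max_length (pvCount max_length memories 0) h2 h3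
      (pvPsums 0 memories).length 0 (pvPsums 0 memories).length (by omega) (Nat.zero_le _) h1 le_rfl]
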